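-- pv_equiv track=rewrite | github.com/BraDing25/ExamGenerator | GeneratorApp/utils/exam_builder.py | _escape_latex_underscores_outside_math
-- ===== SOURCE A (Python) =====
-- def _escape_latex_underscores_outside_math(text):
--     out = []
--     in_math = False
--     escaped = False
--
--     for ch in text:
--         if escaped:
--             out.append(ch)
--             escaped = False
--             continue
--
--         if ch == "\\":
--             out.append(ch)
--             escaped = True
--             continue
--
--         if ch == "$":
--             in_math = not in_math
--             out.append(ch)
--             continue
--
--         if ch == "_" and not in_math:
--             out.append(r"\_")
--             continue
--
--         out.append(ch)
--
--     return "".join(out)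
-- ===== SOURCE B (Python) =====
-- def _escape_latex_underscores_outside_math(text):
--     # Token-based scanner: consumes escape pairs, '$', '_' and maximal runs
--     # of ordinary characters in one step; only an in_math flag is maintained.
--     pieces = []
--     in_math = False
--     i = 0
--     n = len(text)
--     while i < n:
--         ch = text[i]
--         if ch == "\\":
--             pieces.append(text[i:i + 2])  # escaped pair (or lone trailing backslash)
--             i += 2
--         elif ch == "$":
--             in_math = not in_math
--             pieces.append("$")
--             i += 1
--         elif ch == "_":
--             pieces.append("_" if in_math else "\\_")
--             i += 1
--         else:
--             j = i + 1
--             while j < n and text[j] not in "\\$_":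
--                 j += 1
--             pieces.append(text[i:j])
--             i = j
--     return "".join(pieces)
-- ===== Notes on version B (the rewrite author's own statement) =====
-- stated objective: alternative
-- what changed: Replaces A's per-character loop with escaped/in_math flags by a tokenizing scanner that consumes an escaped pair, a dollar sign, an underscore, or a maximal run of ordinary characters per step, keeping only the in_math flag.
import Mathlib
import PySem

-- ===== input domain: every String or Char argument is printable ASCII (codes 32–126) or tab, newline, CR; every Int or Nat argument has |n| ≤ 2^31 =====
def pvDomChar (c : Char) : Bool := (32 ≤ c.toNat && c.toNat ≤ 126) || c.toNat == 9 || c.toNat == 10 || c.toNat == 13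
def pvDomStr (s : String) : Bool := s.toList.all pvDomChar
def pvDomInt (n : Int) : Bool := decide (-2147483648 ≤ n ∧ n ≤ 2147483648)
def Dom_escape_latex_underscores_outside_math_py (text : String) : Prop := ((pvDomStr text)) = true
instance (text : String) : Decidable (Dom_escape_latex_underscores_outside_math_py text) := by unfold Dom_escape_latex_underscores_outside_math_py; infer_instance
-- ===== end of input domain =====

-- B replaces A's per-character loop with flags by a tokenizing scanner (escaped pair /
-- '$' / '_' / maximal ordinary run per step); alternative decomposition, same cost.

-- ===== PORT A =====
-- A's for-loop over characters with the (in_math, escaped) state; out is built front-to-back.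
def pvALoop : List Char → Bool → Bool → List Char
  | [], _, _ => []
  | ch :: rest, inM, esc =>
    if esc then ch :: pvALoop rest inM false
    else if ch = '\\' then ch :: pvALoop rest inM true
    else if ch = '$' then ch :: pvALoop rest (!inM) false
    else if ch = '_' && !inM then '\\' :: '_' :: pvALoop rest inM false
    else ch :: pvALoop rest inM false

def escape_latex_underscores_outside_math_py (text : String) : String :=
  String.ofList (pvALoop text.toList false false)

-- ===== PORT B =====
-- B's inner scan: splits off the maximal run of characters other than '\', '$', '_'.
def pvTakeRun : List Char → List Char × List Char
  | [] => ([], [])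
  | c :: cs =>
    if c = '\\' ∨ c = '$' ∨ c = '_' then ([], c :: cs)
    else
      let p := pvTakeRun cs
      (c :: p.1, p.2)

theorem pvTakeRun_snd_le : ∀ (l : List Char), (pvTakeRun l).2.length ≤ l.length
  | [] => Nat.le_refl _
  | c :: cs => by
    simp only [pvTakeRun]
    split
    · simp
    · exact Nat.le_trans (pvTakeRun_snd_le cs) (Nat.le_succ _)

-- B's token loop: one step per token, only the in_math flag is carried.
def pvBLoop : List Char → Bool → List Char
  | [], _ => []
  | c :: cs, inM =>
    if c = '\\' then
      match cs with
      | [] => ['\\']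
      | d :: ds => '\\' :: d :: pvBLoop ds inM
    else if c = '$' then '$' :: pvBLoop cs (!inM)
    else if c = '_' then (if inM then ['_'] else ['\\', '_']) ++ pvBLoop cs inM
    else (c :: (pvTakeRun cs).1) ++ pvBLoop (pvTakeRun cs).2 inM
termination_by l _ => l.length
decreasing_by
  all_goals simp
  exact pvTakeRun_snd_le cs

def escape_latex_underscores_outside_math_py_alt (text : String) : String :=
  String.ofList (pvBLoop text.toList false)

-- ===== PRECONDITION & SPEC =====
def Spec_escape_latex_underscores_outside_math_py (text : String) (out : String) : Prop := out = escape_latex_underscores_outside_math_py_alt text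
instance (text : String) (out : String) : Decidable (Spec_escape_latex_underscores_outside_math_py text out) := by unfold Spec_escape_latex_underscores_outside_math_py; infer_instance

-- ===== CLAIM (what is proved, stated in full; the proofs are below) =====
def Claim_equal_escape_latex_underscores_outside_math_py : Prop := ∀ (text : String), Dom_escape_latex_underscores_outside_math_py text → Spec_escape_latex_underscores_outside_math_py text (escape_latex_underscores_outside_math_py text)

-- ===== LEMMAS AND PROOFS =====

-- A's loop passes an ordinary-character run through unchanged.
theorem pvALoop_run : ∀ (l : List Char) (inM : Bool),
    pvALoop l inM false = (pvTakeRun l).1 ++ pvALoop (pvTakeRun l).2 inM false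
  | [], _ => rfl
  | c :: cs, inM => by
    simp only [pvTakeRun]
    split
    · simp
    · rename_i hns
      simp only [not_or] at hns
      obtain ⟨h1, h2, h3⟩ := hns
      simp [pvALoop, h1, h2, h3, pvALoop_run cs inM]

theorem pvLoop_eq : ∀ (n : ℕ) (l : List Char) (inM : Bool), l.length ≤ n →
    pvALoop l inM false = pvBLoop l inM := by
  intro n
  induction n with
  | zero =>
    intro l inM h
    have : l = [] := List.eq_nil_of_length_eq_zero (Nat.le_zero.mp h)
    subst this
    simp [pvALoop, pvBLoop]
  | succ n ih =>
    intro l inM h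
    rw [pvBLoop.eq_def]
    match l with
    | [] => simp [pvALoop]
    | c :: cs =>
      have h' : cs.length ≤ n := by simpa using h
      by_cases h1 : c = '\\'
      · subst h1
        match cs with
        | [] => simp [pvALoop]
        | d :: ds =>
          have hds : ds.length ≤ n := by simp at h'; omega
          simp [pvALoop, ih ds inM hds]
      · by_cases h2 : c = '$'
        · subst h2
          simp [pvALoop, ih cs (!inM) h']
        · by_cases h3 : c = '_'
          · subst h3
            cases inM <;> simp [pvALoop, ih cs _ h']
          · simp only [if_neg h1, if_neg h2, if_neg h3]
            rw [pvALoop_run (c :: cs) inM]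
            simp only [pvTakeRun]
            rw [if_neg (by tauto)]
            have hle : (pvTakeRun cs).2.length ≤ n :=
              Nat.le_trans (pvTakeRun_snd_le cs) h'
            simp [ih (pvTakeRun cs).2 inM hle]

-- ===== VERDICT (by name: the statement is the Claim_ definition above) =====
theorem escape_latex_underscores_outside_math_py_spec : Claim_equal_escape_latex_underscores_outside_math_py := by
  intro text _
  unfold Spec_escape_latex_underscores_outside_math_py
  unfold escape_latex_underscores_outside_math_py escape_latex_underscores_outside_math_py_alt
  rw [pvLoop_eq text.toList.length text.toList false (Nat.le_refl _)]
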